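-- pv_equiv track=rewrite | github.com/MShelUR/Zebrafish-Tracking | process_movement.py | get_largest_body
-- ===== SOURCE A (Python) =====
-- from collections import deque
--
-- def get_neighbors(pixel, check_corners):
--     neighbors = []
--
--     for dx in range(-1,2,2):
--         neighbors.append((pixel[0]+dx,pixel[1]))
--
--     for dy in range(-1,2,2):
--         neighbors.append((pixel[0],pixel[1]+dy))
--
--     if check_corners:
--         for dx in range(-1,2,2):
--             for dy in range(-1,2,2):
--                 neighbors.append((pixel[0]+dx,pixel[1]+dy))
--
--     return neighbors
--
-- def get_matching_neighbors_from_set(starting_point, comparison_set, check_corners=False):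
--
--     unchecked_pixels = deque() # need to be processed
--     closed_pixels = {} # don't add to unchecked
--     match_pixels = {} # is in the dish
--
--     unchecked_pixels.append(starting_point)
--     closed_pixels[starting_point] = True
--
--     while len(unchecked_pixels) > 0:
--         new_pixel = unchecked_pixels.popleft()
--
--         if comparison_set.get(new_pixel):
--             match_pixels[new_pixel] = True
--
--             new_neighbors = get_neighbors(new_pixel, check_corners)
--             for neighbor in new_neighbors:
--                 if not closed_pixels.get(neighbor) and comparison_set.get(neighbor):
--                     unchecked_pixels.append(neighbor)
--                     closed_pixels[neighbor] = True
--
--     return match_pixels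
--
-- def get_largest_body(pixels):
--     bodies = []
--
--     closed_pixels = {}
--
--     for pixel in pixels:
--         if closed_pixels.get(pixel):
--             continue
--
--         body = get_matching_neighbors_from_set(pixel, pixels, True)
--
--         for body_pixel in body:
--             closed_pixels[body_pixel] = True
--
--         bodies.append(body)
--
--     if len(bodies) == 0:
--         return {} # no pixels
--
--     selected_body = bodies[0]
--     selected_size = len(bodies[0])
--
--     for body in bodies:
--         body_size = len(body)
--         if body_size > selected_size:
--             selected_body = body
--             selected_size = body_size
--
--     return selected_body
-- ===== SOURCE B (Python) =====
-- def get_largest_body(pixels):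
--     def layers_from(frontier, seen):
--         # expand a whole frontier into the next one; recursion, no queue
--         if not frontier:
--             return []
--         nxt = []
--         for (x, y) in frontier:
--             for n in ((x - 1, y), (x + 1, y), (x, y - 1), (x, y + 1),
--                       (x - 1, y - 1), (x - 1, y + 1), (x + 1, y - 1), (x + 1, y + 1)):
--                 if n not in seen and pixels.get(n):
--                     seen.add(n)
--                     nxt.append(n)
--         return [frontier] + layers_from(nxt, seen)
--
--     done = set()
--     best = []
--     for seed in pixels:
--         if seed in done or not pixels.get(seed):
--             continue
--         comp = [p for layer in layers_from([seed], {seed}) for p in layer]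
--         done.update(comp)
--         if len(comp) > len(best):
--             best = comp
--     return {p: True for p in best}
-- ===== Notes on version B (the rewrite author's own statement) =====
-- stated objective: alternative
-- what changed: B replaces A's FIFO-queue flood fill (deque popped pixel-by-pixel with separate closed/match dicts, run even on falsy seeds, then a second pass over the collected bodies to pick the largest) with a recursive level-synchronous frontier expansion: each recursive call expands one whole frontier into the next layer and the component is the flattened list of layers; falsy seeds are skipped outright and a running largest component replaces the bodies list and its rescan.
import Mathlib
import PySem

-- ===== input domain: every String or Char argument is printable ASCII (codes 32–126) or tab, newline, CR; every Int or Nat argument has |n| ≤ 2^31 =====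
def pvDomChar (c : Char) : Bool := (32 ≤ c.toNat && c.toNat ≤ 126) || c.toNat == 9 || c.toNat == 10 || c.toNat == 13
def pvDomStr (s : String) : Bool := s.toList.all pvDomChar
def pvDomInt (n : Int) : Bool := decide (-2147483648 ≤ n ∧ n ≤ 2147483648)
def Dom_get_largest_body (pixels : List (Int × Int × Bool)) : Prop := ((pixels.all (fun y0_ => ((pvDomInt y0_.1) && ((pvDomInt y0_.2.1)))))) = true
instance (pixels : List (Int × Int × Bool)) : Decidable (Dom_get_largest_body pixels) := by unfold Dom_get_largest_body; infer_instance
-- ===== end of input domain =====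

-- B is ALTERNATIVE: it replaces A's FIFO-queue flood fill with a recursive
-- level-by-level frontier expansion (no queue, no per-pixel pop: each call expands a
-- whole frontier and returns the list of layers), skips falsy seeds instead of running
-- the fill on them, and keeps a running largest component instead of collecting every
-- body and rescanning. The equivalence is about the return value; neither mutates its argument.

-- ===== PORT A =====
-- the input dict's `pixels.get(k)` (truthiness: missing key -> None -> falsy, stored False -> falsy);
-- first-match lookup, used by both ports for the (read-only) input dict
def pixGet (pixels : List (Int × Int × Bool)) (k : Int × Int) : Bool :=
  match pixels.find? (fun t => t.1 == k.1 && t.2.1 == k.2) with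
  | some t => t.2.2
  | none => false

def get_neighbors (pixel : Int × Int) (check_corners : Bool) : List (Int × Int) :=
  let neighbors : List (Int × Int) := []
  let neighbors := (PySem.List.pyRange (-1) 2 2).foldl
    (fun acc dx => acc ++ [(pixel.1 + dx, pixel.2)]) neighbors
  let neighbors := (PySem.List.pyRange (-1) 2 2).foldl
    (fun acc dy => acc ++ [(pixel.1, pixel.2 + dy)]) neighbors
  if check_corners then
    (PySem.List.pyRange (-1) 2 2).foldl (fun acc dx =>
      (PySem.List.pyRange (-1) 2 2).foldl
        (fun acc dy => acc ++ [(pixel.1 + dx, pixel.2 + dy)]) acc) neighbors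
  else neighbors

-- the `while len(unchecked_pixels) > 0` loop; deque -> list popped at the head; fuel
-- (one more than the number of dict entries) is never exhausted: every iteration pops
-- a distinct closed pixel and closed pixels are keys of the dict
def gmn_loop (pixels : List (Int × Int × Bool)) (check_corners : Bool) :
    Nat → List (Int × Int) → PySem.Dict (Int × Int) Bool → PySem.Dict (Int × Int) Bool →
    PySem.Dict (Int × Int) Bool
  | 0, _, _, m => m
  | _ + 1, [], _, m => m
  | f + 1, cur :: rest, closed, m =>
    if pixGet pixels cur then
      let m' := m.insert cur true
      let st := (get_neighbors cur check_corners).foldl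
        (fun (s : List (Int × Int) × PySem.Dict (Int × Int) Bool) nb =>
          if !(s.2.getD nb false) && pixGet pixels nb then (s.1 ++ [nb], s.2.insert nb true)
          else s)
        (rest, closed)
      gmn_loop pixels check_corners f st.1 st.2 m'
    else gmn_loop pixels check_corners f rest closed m

def get_matching_neighbors_from_set (starting_point : Int × Int)
    (comparison_set : List (Int × Int × Bool)) (check_corners : Bool) :
    PySem.Dict (Int × Int) Bool :=
  gmn_loop comparison_set check_corners (comparison_set.length + 1) [starting_point]
    (PySem.Dict.empty.insert starting_point true) PySem.Dict.empty

def get_largest_body (pixels : List (Int × Int × Bool)) : List (Int × Int × Bool) :=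
  let st := pixels.foldl
    (fun (s : PySem.Dict (Int × Int) Bool × List (PySem.Dict (Int × Int) Bool)) t =>
      let pixel := (t.1, t.2.1)
      if s.1.getD pixel false then s
      else
        let body := get_matching_neighbors_from_set pixel pixels true
        let closed' := body.keys.foldl (fun c bp => c.insert bp true) s.1
        (closed', s.2 ++ [body]))
    (PySem.Dict.empty, [])
  let bodies := st.2
  match bodies with
  | [] => []
  | b0 :: _ =>
    let sel := bodies.foldl
      (fun (s : PySem.Dict (Int × Int) Bool × Nat) body =>
        if body.size > s.2 then (body, body.size) else s)
      (b0, b0.size)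
    sel.1.items.map (fun p => (p.1.1, p.1.2, p.2))

-- ===== PORT B =====
-- the 8-neighbour tuple of Source B, in its order
def nbrs (p : Int × Int) : List (Int × Int) :=
  [(p.1 - 1, p.2), (p.1 + 1, p.2), (p.1, p.2 - 1), (p.1, p.2 + 1),
   (p.1 - 1, p.2 - 1), (p.1 - 1, p.2 + 1), (p.1 + 1, p.2 - 1), (p.1 + 1, p.2 + 1)]

-- the double for-loop of layers_from: expands a whole frontier, growing (seen, nxt)
def expand (pixels : List (Int × Int × Bool))
    (st : PySem.Set (Int × Int) × List (Int × Int)) (frontier : List (Int × Int)) :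
    PySem.Set (Int × Int) × List (Int × Int) :=
  frontier.foldl (fun s p =>
    (nbrs p).foldl (fun (s : PySem.Set (Int × Int) × List (Int × Int)) n =>
      if !(PySem.Set.contains s.1 n) && pixGet pixels n then
        (PySem.Set.add s.1 n, s.2 ++ [n])
      else s) s) st

-- Source B's recursive layers_from; fuel (one more than the number of dict entries) is
-- never exhausted: each recursive call's frontier is nonempty and frontiers hold
-- distinct truthy pixels
def layers_from (pixels : List (Int × Int × Bool)) :
    Nat → List (Int × Int) → PySem.Set (Int × Int) → List (List (Int × Int))
  | 0, _, _ => []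
  | _ + 1, [], _ => []
  | f + 1, frontier, seen =>
    let st := expand pixels (seen, []) frontier
    frontier :: layers_from pixels f st.2 st.1

def get_largest_body_alt (pixels : List (Int × Int × Bool)) : List (Int × Int × Bool) :=
  let st := pixels.foldl
    (fun (s : PySem.Set (Int × Int) × List (Int × Int)) t =>
      let seed := (t.1, t.2.1)
      if PySem.Set.contains s.1 seed || !(pixGet pixels seed) then s
      else
        let comp := (layers_from pixels (pixels.length + 1) [seed]
          (PySem.Set.add PySem.Set.empty seed)).flatten
        (PySem.Set.update s.1 comp, if comp.length > s.2.length then comp else s.2))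
    (PySem.Set.empty, [])
  st.2.map (fun p => (p.1, p.2, true))

-- ===== PRECONDITION & SPEC =====
def Spec_get_largest_body (pixels : List (Int × Int × Bool)) (out : List (Int × Int × Bool)) : Prop := out = get_largest_body_alt pixels
instance (pixels : List (Int × Int × Bool)) (out : List (Int × Int × Bool)) : Decidable (Spec_get_largest_body pixels out) := by unfold Spec_get_largest_body; infer_instance

-- ===== CLAIM (what is proved, stated in full; the proofs are below) =====
def Claim_equal_get_largest_body : Prop := ∀ (pixels : List (Int × Int × Bool)), Dom_get_largest_body pixels → Spec_get_largest_body pixels (get_largest_body pixels)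

-- ===== LEMMAS AND PROOFS =====

-- the keys of the input dict, in order
def keysP (pixels : List (Int × Int × Bool)) : List (Int × Int) :=
  pixels.map (fun t => (t.1, t.2.1))

-- the dicts A builds always map their keys to True: view a key list as such a dict
def dictOf (S : List (Int × Int)) : PySem.Dict (Int × Int) Bool :=
  PySem.Dict.mk (S.map (fun p => (p, true)))

def allT (pixels : List (Int × Int × Bool)) (l : List (Int × Int)) : Prop :=
  ∀ p ∈ l, pixGet pixels p = true

-- the effect of one neighbor-scan round on the seen list
def grow (pixels : List (Int × Int × Bool)) (ns : List (Int × Int)) (c : List (Int × Int)) :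
    List (Int × Int) :=
  ns.foldl (fun c nb => if !(c.contains nb) && pixGet pixels nb then c ++ [nb] else c) c

-- the seen list after expanding a whole frontier (new pixels appended at the end)
def frontStep (pixels : List (Int × Int × Bool)) (S F : List (Int × Int)) :
    List (Int × Int) :=
  F.foldl (fun S p => grow pixels (nbrs p) S) S

-- A's running "largest so far" over a list of bodies, from the empty dict
def foldsel (bodies : List (PySem.Dict (Int × Int) Bool)) : PySem.Dict (Int × Int) Bool :=
  bodies.foldl (fun s body => if body.size > s.size then body else s) (dictOf [])

theorem grow_cons (pixels : List (Int × Int × Bool)) (nb : Int × Int)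
    (ns c : List (Int × Int)) :
    grow pixels (nb :: ns) c
      = grow pixels ns (if !(c.contains nb) && pixGet pixels nb then c ++ [nb] else c) := rfl

theorem cond_split {pixels : List (Int × Int × Bool)} {nb : Int × Int} {c : List (Int × Int)}
    (h : (!(c.contains nb) && pixGet pixels nb) = true) :
    nb ∉ c ∧ pixGet pixels nb = true := by
  rw [Bool.and_eq_true] at h
  exact ⟨by simpa using h.1, h.2⟩

theorem pixGet_mem {pixels : List (Int × Int × Bool)} {p : Int × Int}
    (h : pixGet pixels p = true) : p ∈ keysP pixels := by
  unfold pixGet at h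
  cases hf : pixels.find? (fun t => t.1 == p.1 && t.2.1 == p.2) with
  | none => rw [hf] at h; simp at h
  | some t =>
    have hp := List.find?_some hf
    have hm := List.mem_of_find?_eq_some hf
    simp only [Bool.and_eq_true, beq_iff_eq] at hp
    exact List.mem_map.2 ⟨t, hm, by simp [hp.1, hp.2]⟩

theorem keys_dictOf (S : List (Int × Int)) : (dictOf S).keys = S := by
  simp [dictOf, PySem.Dict.keys, Function.comp_def]

theorem size_dictOf (S : List (Int × Int)) : (dictOf S).size = S.length := by
  simp [dictOf, PySem.Dict.size]

theorem eq_empty_of_size_zero {b : PySem.Dict (Int × Int) Bool} (h : b.size = 0) :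
    b = dictOf [] := by
  apply PySem.Dict.ext
  simp only [PySem.Dict.size] at h
  simp [dictOf, List.length_eq_zero_iff.1 h]

theorem getD_dictOf (S : List (Int × Int)) (p : Int × Int) :
    (dictOf S).getD p false = S.contains p := by
  unfold dictOf
  induction S with
  | nil => simp [PySem.Dict.getD, PySem.Dict.get?]
  | cons a S ih =>
    simp only [List.map_cons, PySem.Dict.getD_eq_get?_getD, PySem.Dict.get?_mk_cons] at *
    by_cases h : a = p
    · simp [h]
    · have h1 : (a == p) = false := by simp [h]
      have h2 : (p == a) = false := by simp; exact fun hh => h hh.symm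
      simp [h1, ih]
      intro hh
      exact absurd hh.symm h

theorem insert_dictOf (S : List (Int × Int)) (p : Int × Int) :
    (dictOf S).insert p true = dictOf (PySem.Set.add S p) := by
  by_cases h : p ∈ S
  · rw [PySem.Set.add_of_mem h]
    apply PySem.Dict.ext
    rw [PySem.Dict.items_insert_of_contains]
    · show (List.map (fun q => (q, true)) S).map _ = (dictOf S).items
      rw [List.map_map]
      apply List.map_congr_left
      intro a _
      simp only [Function.comp]
      by_cases hap : a = p
      · simp [hap]
      · simp [hap]
    · rw [PySem.Dict.contains_iff_mem_keys, keys_dictOf]; exact h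
  · rw [PySem.Set.add_of_not_mem h]
    apply PySem.Dict.ext
    rw [PySem.Dict.items_insert_of_not_contains]
    · simp [dictOf]
    · have hc : ¬ (dictOf S).contains p = true := by
        rw [PySem.Dict.contains_iff_mem_keys, keys_dictOf]; exact h
      simpa using hc

theorem neighbors_true_eq (p : Int × Int) : get_neighbors p true = nbrs p := by
  have hr : PySem.List.pyRange (-1) 2 2 = [-1, 1] := by decide
  simp [get_neighbors, nbrs, hr, Int.sub_eq_add_neg]

theorem gmn_nil (pixels : List (Int × Int × Bool)) (cc : Bool) (f : Nat)
    (C M : PySem.Dict (Int × Int) Bool) : gmn_loop pixels cc f [] C M = M := by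
  cases f <;> rfl

theorem length_le_of_allT {pixels : List (Int × Int × Bool)} {c : List (Int × Int)}
    (hn : c.Nodup) (ht : allT pixels c) : c.length ≤ pixels.length := by
  have h2 : c.toFinset ⊆ (keysP pixels).toFinset := by
    intro x hx
    simp only [List.mem_toFinset] at *
    exact pixGet_mem (ht x hx)
  have h3 := Finset.card_le_card h2
  have h4 := List.toFinset_card_le (keysP pixels)
  rw [List.toFinset_card_of_nodup hn] at h3
  have h5 : (keysP pixels).length = pixels.length := by simp [keysP]
  omega

theorem grow_append (pixels : List (Int × Int × Bool)) :
    ∀ (ns c : List (Int × Int)), ∃ e, grow pixels ns c = c ++ e := by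
  intro ns
  induction ns with
  | nil => intro c; exact ⟨[], by simp [grow]⟩
  | cons nb ns ih =>
    intro c
    rw [grow_cons]
    by_cases h : (!(c.contains nb) && pixGet pixels nb) = true
    · rw [if_pos h]
      obtain ⟨e, he⟩ := ih (c ++ [nb])
      exact ⟨nb :: e, by simp [he]⟩
    · rw [if_neg h]
      exact ih c

theorem frontStep_append (pixels : List (Int × Int × Bool)) :
    ∀ (F S : List (Int × Int)), ∃ e, frontStep pixels S F = S ++ e := by
  intro F
  induction F with
  | nil => intro S; exact ⟨[], by simp [frontStep]⟩
  | cons p F ih =>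
    intro S
    obtain ⟨e0, he0⟩ := grow_append pixels (nbrs p) S
    obtain ⟨e, he⟩ := ih (grow pixels (nbrs p) S)
    exact ⟨e0 ++ e, by simp [frontStep] at he ⊢; rw [he, he0, List.append_assoc]⟩

theorem grow_nodup {pixels : List (Int × Int × Bool)} :
    ∀ (ns : List (Int × Int)) {c : List (Int × Int)}, c.Nodup → (grow pixels ns c).Nodup := by
  intro ns
  induction ns with
  | nil => intro c hn; simpa [grow] using hn
  | cons nb ns ih =>
    intro c hn
    rw [grow_cons]
    by_cases h : (!(c.contains nb) && pixGet pixels nb) = true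
    · rw [if_pos h]
      apply ih
      simp only [List.nodup_append, List.nodup_cons, List.nodup_nil, and_true]
      refine ⟨hn, ?_, ?_⟩
      · simp
      · intro a ha b hb
        simp only [List.mem_singleton] at hb
        subst hb
        exact fun he => (cond_split h).1 (he ▸ ha)
    · rw [if_neg h]
      exact ih hn

theorem frontStep_nodup {pixels : List (Int × Int × Bool)} :
    ∀ (F : List (Int × Int)) {S : List (Int × Int)}, S.Nodup →
      (frontStep pixels S F).Nodup := by
  intro F
  induction F with
  | nil => intro S h; simpa [frontStep] using h
  | cons p F ih =>
    intro S hS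
    show (frontStep pixels (grow pixels (nbrs p) S) F).Nodup
    exact ih (grow_nodup _ hS)

-- A's neighbor fold, related to grow
theorem foldA_eq (pixels : List (Int × Int × Bool)) :
    ∀ (ns q c : List (Int × Int)),
    (ns.foldl
      (fun (s : List (Int × Int) × PySem.Dict (Int × Int) Bool) nb =>
        if !(s.2.getD nb false) && pixGet pixels nb then (s.1 ++ [nb], s.2.insert nb true)
        else s) (q, dictOf c))
    = (q ++ (grow pixels ns c).drop c.length, dictOf (grow pixels ns c)) := by
  intro ns
  induction ns with
  | nil => intro q c; simp [grow, List.drop_length]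
  | cons nb ns ih =>
    intro q c
    simp only [List.foldl_cons, getD_dictOf]
    rw [grow_cons]
    by_cases h : (!(c.contains nb) && pixGet pixels nb) = true
    · rw [if_pos h, if_pos h]
      rw [insert_dictOf, PySem.Set.add_of_not_mem (cond_split h).1]
      rw [ih (q ++ [nb]) (c ++ [nb])]
      obtain ⟨e, he⟩ := grow_append pixels ns (c ++ [nb])
      have h1 : (grow pixels ns (c ++ [nb])).drop (c ++ [nb]).length = e := by
        rw [he, List.drop_left]
      have h2 : (grow pixels ns (c ++ [nb])).drop c.length = nb :: e := by
        rw [he, List.append_assoc, List.drop_left]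
        rfl
      rw [h1, h2]
      simp
    · rw [if_neg h, if_neg h]
      exact ih q c

-- B's inner neighbor fold (over one pixel's nbrs), related to grow
theorem foldB_inner_eq (pixels : List (Int × Int × Bool)) :
    ∀ (ns S acc : List (Int × Int)),
    (ns.foldl
      (fun (s : PySem.Set (Int × Int) × List (Int × Int)) n =>
        if !(PySem.Set.contains s.1 n) && pixGet pixels n then
          (PySem.Set.add s.1 n, s.2 ++ [n])
        else s) (S, acc))
    = (grow pixels ns S, acc ++ (grow pixels ns S).drop S.length) := by
  intro ns
  induction ns with
  | nil => intro S acc; simp [grow, List.drop_length]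
  | cons nb ns ih =>
    intro S acc
    simp only [List.foldl_cons, PySem.Set.contains_eq_listContains]
    rw [grow_cons]
    by_cases h : (!(S.contains nb) && pixGet pixels nb) = true
    · rw [if_pos h, if_pos h, PySem.Set.add_of_not_mem (cond_split h).1]
      have ih' := ih (S ++ [nb]) (acc ++ [nb])
      simp only [PySem.Set.contains_eq_listContains] at ih'
      rw [ih']
      obtain ⟨e, he⟩ := grow_append pixels ns (S ++ [nb])
      have h1 : (grow pixels ns (S ++ [nb])).drop (S ++ [nb]).length = e := by
        rw [he, List.drop_left]
      have h2 : (grow pixels ns (S ++ [nb])).drop S.length = nb :: e := by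
        rw [he, List.append_assoc, List.drop_left]
        rfl
      rw [h1, h2]
      simp
    · rw [if_neg h, if_neg h]
      exact ih S acc

-- B's expand (the double loop), related to frontStep
theorem expand_eq (pixels : List (Int × Int × Bool)) :
    ∀ (F S acc : List (Int × Int)),
    expand pixels (S, acc) F
      = (frontStep pixels S F, acc ++ (frontStep pixels S F).drop S.length) := by
  intro F
  induction F with
  | nil => intro S acc; simp [expand, frontStep, List.drop_length]
  | cons p F ih =>
    intro S acc
    show (F.foldl _ ((nbrs p).foldl _ (S, acc))) = _
    rw [foldB_inner_eq]
    have : (F.foldl (fun s p =>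
        (nbrs p).foldl (fun (s : PySem.Set (Int × Int) × List (Int × Int)) n =>
          if !(PySem.Set.contains s.1 n) && pixGet pixels n then
            (PySem.Set.add s.1 n, s.2 ++ [n])
          else s) s)
        (grow pixels (nbrs p) S, acc ++ (grow pixels (nbrs p) S).drop S.length))
        = expand pixels (grow pixels (nbrs p) S,
            acc ++ (grow pixels (nbrs p) S).drop S.length) F := rfl
    rw [this, ih]
    obtain ⟨e0, he0⟩ := grow_append pixels (nbrs p) S
    obtain ⟨e, he⟩ := frontStep_append pixels F (grow pixels (nbrs p) S)
    have hfs : frontStep pixels S (p :: F) = frontStep pixels (grow pixels (nbrs p) S) F := rfl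
    rw [hfs, he, he0]
    rw [List.drop_left, List.drop_left,
      show S ++ e0 ++ e = S ++ (e0 ++ e) by simp, List.drop_left]
    simp

-- grow appends only truthy pixels
theorem grow_spec (pixels : List (Int × Int × Bool)) :
    ∀ (ns c : List (Int × Int)), ∃ e, grow pixels ns c = c ++ e ∧ allT pixels e := by
  intro ns
  induction ns with
  | nil => intro c; exact ⟨[], by simp [grow], by intro p hp; simp at hp⟩
  | cons nb ns ih =>
    intro c
    rw [grow_cons]
    by_cases h : (!(c.contains nb) && pixGet pixels nb) = true
    · rw [if_pos h]
      obtain ⟨e, he, hte⟩ := ih (c ++ [nb])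
      refine ⟨nb :: e, by simp [he], ?_⟩
      intro p hp
      rcases List.mem_cons.1 hp with hp | hp
      · rw [hp]; exact (cond_split h).2
      · exact hte p hp
    · rw [if_neg h]
      exact ih c

theorem frontStep_spec (pixels : List (Int × Int × Bool)) :
    ∀ (F S : List (Int × Int)), ∃ e, frontStep pixels S F = S ++ e ∧ allT pixels e := by
  intro F
  induction F with
  | nil => intro S; exact ⟨[], by simp [frontStep], by intro p hp; simp at hp⟩
  | cons p F ih =>
    intro S
    obtain ⟨e0, he0, hte0⟩ := grow_spec pixels (nbrs p) S
    obtain ⟨e, he, hte⟩ := ih (grow pixels (nbrs p) S)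
    refine ⟨e0 ++ e, ?_, ?_⟩
    · show frontStep pixels (grow pixels (nbrs p) S) F = S ++ (e0 ++ e)
      rw [he, he0, List.append_assoc]
    · intro q hq
      rcases List.mem_append.1 hq with hq | hq
      · exact hte0 q hq
      · exact hte q hq

theorem frontStep_cons (pixels : List (Int × Int × Bool)) (p : Int × Int)
    (S F : List (Int × Int)) :
    frontStep pixels S (p :: F) = frontStep pixels (grow pixels (nbrs p) S) F := by
  unfold frontStep
  rw [List.foldl_cons]

theorem layers_from_cons (pixels : List (Int × Int × Bool)) (f : Nat) (p : Int × Int)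
    (F : List (Int × Int)) (seen : PySem.Set (Int × Int)) :
    layers_from pixels (f + 1) (p :: F) seen
      = (p :: F) :: layers_from pixels f (expand pixels (seen, []) (p :: F)).2
          (expand pixels (seen, []) (p :: F)).1 := rfl

-- processing one whole frontier F at the head of A's queue
theorem step_frontier (pixels : List (Int × Int × Bool)) :
    ∀ (F P N : List (Int × Int)) (g : Nat), (P ++ F ++ N).Nodup → allT pixels (F ++ N) →
    gmn_loop pixels true (F.length + g) (F ++ N) (dictOf (P ++ F ++ N)) (dictOf P)
      = gmn_loop pixels true g
          (N ++ (frontStep pixels (P ++ F ++ N) F).drop (P ++ F ++ N).length)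
          (dictOf (frontStep pixels (P ++ F ++ N) F)) (dictOf (P ++ F)) := by
  intro F
  induction F with
  | nil =>
    intro P N g hn ht
    simp [frontStep, List.drop_length]
  | cons f0 F ih =>
    intro P N g hn ht
    have hf0 : pixGet pixels f0 = true := ht f0 (by simp)
    show gmn_loop pixels true (F.length + 1 + g) (f0 :: (F ++ N)) _ _ = _
    rw [show F.length + 1 + g = (F.length + g) + 1 by omega]
    show (if pixGet pixels f0 then _ else _) = _
    rw [if_pos hf0, neighbors_true_eq]
    rw [show dictOf (P ++ (f0 :: F) ++ N) = dictOf (P ++ f0 :: (F ++ N)) by simp]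
    rw [foldA_eq pixels (nbrs f0) (F ++ N) (P ++ f0 :: (F ++ N))]
    have hm : (dictOf P).insert f0 true = dictOf (P ++ [f0]) := by
      rw [insert_dictOf, PySem.Set.add_of_not_mem]
      intro hmem
      have hn2 : (P ++ (f0 :: F ++ N)).Nodup := by simpa using hn
      exact (List.disjoint_of_nodup_append hn2) hmem (by simp)
    rw [hm]
    obtain ⟨E0, hE0, htE0⟩ := grow_spec pixels (nbrs f0) (P ++ f0 :: (F ++ N))
    have hdrop0 : (grow pixels (nbrs f0) (P ++ f0 :: (F ++ N))).drop
        (P ++ f0 :: (F ++ N)).length = E0 := by rw [hE0, List.drop_left]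
    rw [hdrop0]
    have hshape : grow pixels (nbrs f0) (P ++ f0 :: (F ++ N))
        = (P ++ [f0]) ++ F ++ (N ++ E0) := by rw [hE0]; simp
    have hn' : ((P ++ [f0]) ++ F ++ (N ++ E0)).Nodup := by
      rw [← hshape]
      exact grow_nodup _ (by simpa using hn)
    have ht' : allT pixels (F ++ (N ++ E0)) := by
      intro p hp
      rcases List.mem_append.1 hp with hp | hp
      · exact ht p (by simp [hp])
      · rcases List.mem_append.1 hp with hp | hp
        · exact ht p (by simp [hp])
        · exact htE0 p hp
    have hrec := ih (P ++ [f0]) (N ++ E0) g hn' ht'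
    rw [hshape]
    rw [show (F ++ N) ++ E0 = F ++ (N ++ E0) by simp, hrec]
    -- identify the two sides' frontStep states and drops
    have hbase : (P ++ [f0]) ++ F ++ (N ++ E0)
        = (P ++ (f0 :: F) ++ N) ++ E0 := by simp
    have hS : grow pixels (nbrs f0) (P ++ (f0 :: F) ++ N)
        = (P ++ [f0]) ++ F ++ (N ++ E0) := by
      rw [show P ++ (f0 :: F) ++ N = P ++ f0 :: (F ++ N) by simp, hE0]
      simp
    have hfs : frontStep pixels (P ++ (f0 :: F) ++ N) (f0 :: F)
        = frontStep pixels ((P ++ [f0]) ++ F ++ (N ++ E0)) F := by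
      rw [frontStep_cons, hS]
    obtain ⟨e, he, -⟩ := frontStep_spec pixels F ((P ++ [f0]) ++ F ++ (N ++ E0))
    have hd1 : (frontStep pixels ((P ++ [f0]) ++ F ++ (N ++ E0)) F).drop
        ((P ++ [f0]) ++ F ++ (N ++ E0)).length = e := by rw [he, List.drop_left]
    have hd2 : (frontStep pixels ((P ++ [f0]) ++ F ++ (N ++ E0)) F).drop
        (P ++ (f0 :: F) ++ N).length = E0 ++ e := by
      rw [he]
      rw [show (P ++ [f0]) ++ F ++ (N ++ E0) ++ e = (P ++ (f0 :: F) ++ N) ++ (E0 ++ e) by simp]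
      rw [List.drop_left]
    rw [hd1, hfs, hd2]
    rw [show (N ++ E0) ++ e = N ++ (E0 ++ e) by simp,
      show (P ++ [f0]) ++ F = P ++ (f0 :: F) by simp]

-- the heart: A's queue BFS and B's layered recursion compute the same component
theorem bfs_eq (pixels : List (Int × Int × Bool)) :
    ∀ (f : Nat) (P F : List (Int × Int)) (g : Nat), (P ++ F).Nodup → allT pixels (P ++ F) →
      pixels.length - P.length ≤ f → pixels.length - P.length ≤ g →
      gmn_loop pixels true g F (dictOf (P ++ F)) (dictOf P)
        = dictOf (P ++ (layers_from pixels f F (P ++ F)).flatten) := by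
  intro f
  induction f with
  | zero =>
    intro P F g hn ht hf hg
    have hle := length_le_of_allT hn ht
    rw [List.length_append] at hle
    have hF : F = [] := List.length_eq_zero_iff.1 (by omega)
    subst hF
    rw [gmn_nil]
    simp [layers_from]
  | succ f ih =>
    intro P F g hn ht hf hg
    cases F with
    | nil =>
      rw [gmn_nil]
      simp [layers_from]
    | cons f0 F' =>
      -- process the whole frontier f0 :: F' via step_frontier (N = [])
      have hlen : (f0 :: F').length ≤ g := by
        have hle := length_le_of_allT hn ht
        rw [List.length_append] at hle
        omega
      have hg' : g = (f0 :: F').length + (g - (f0 :: F').length) := by omega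
      have htF : allT pixels ((f0 :: F') ++ []) := by
        intro p hp
        exact ht p (by simp at hp ⊢; tauto)
      have hnF : (P ++ (f0 :: F') ++ []).Nodup := by simpa using hn
      have h1 := step_frontier pixels (f0 :: F') P [] (g - (f0 :: F').length) hnF htF
      simp only [List.append_nil, List.nil_append] at h1
      rw [hg', h1]
      -- the recursive layer
      obtain ⟨E, hE, htE⟩ := frontStep_spec pixels (f0 :: F') (P ++ (f0 :: F'))
      have hdE : (frontStep pixels (P ++ (f0 :: F')) (f0 :: F')).drop
          (P ++ (f0 :: F')).length = E := by rw [hE, List.drop_left]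
      rw [hdE, hE]
      have hnod : ((P ++ (f0 :: F')) ++ E).Nodup := by
        rw [← hE]; exact frontStep_nodup _ hn
      have htall : allT pixels ((P ++ (f0 :: F')) ++ E) := by
        intro p hp
        rcases List.mem_append.1 hp with hp | hp
        · exact ht p hp
        · exact htE p hp
      have hlePF : (P ++ (f0 :: F')).length ≥ P.length + 1 := by simp
      have hrec := ih (P ++ (f0 :: F')) E (g - (f0 :: F').length) hnod htall
        (by omega)
        (by simp only [List.length_append]; simp at hlen ⊢; omega)
      rw [hrec]
      -- unfold one step of layers_from on the B side
      rw [layers_from_cons, expand_eq pixels (f0 :: F') (P ++ (f0 :: F')) [], hdE, hE]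
      simp

theorem gmn_falsy (pixels : List (Int × Int × Bool)) (p : Int × Int)
    (h : pixGet pixels p = false) :
    get_matching_neighbors_from_set p pixels true = dictOf [] := by
  show (if pixGet pixels p then _ else _) = _
  rw [if_neg (by simp [h])]
  rw [gmn_nil]
  rfl

-- A's component from a truthy seed, as B's flattened layers
theorem gmn_truthy (pixels : List (Int × Int × Bool)) (p : Int × Int)
    (h : pixGet pixels p = true) :
    get_matching_neighbors_from_set p pixels true
      = dictOf ((layers_from pixels (pixels.length + 1) [p] [p]).flatten) := by
  have h0 := bfs_eq pixels (pixels.length + 1) [] [p] (pixels.length + 1)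
    (by simp) (by intro q hq; simp at hq; rw [hq]; exact h) (by simp) (by simp)
  simpa [get_matching_neighbors_from_set,
    show (PySem.Dict.empty : PySem.Dict (Int × Int) Bool).insert p true = dictOf [p] from rfl,
    show (PySem.Dict.empty : PySem.Dict (Int × Int) Bool) = dictOf [] from rfl] using h0

theorem foldl_mark :
    ∀ (l D : List (Int × Int)),
    l.foldl (fun c bp => c.insert bp true) (dictOf D) = dictOf (PySem.Set.update D l) := by
  intro l
  induction l with
  | nil => intro D; simp [PySem.Set.update]
  | cons bp l ih =>
    intro D
    simp only [List.foldl_cons, insert_dictOf, PySem.Set.update_cons]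
    exact ih (PySem.Set.add D bp)

theorem selstep_self (b : PySem.Dict (Int × Int) Bool) :
    (if b.size > b.size then b else b) = b := by simp

theorem selstep_empty (b : PySem.Dict (Int × Int) Bool) :
    (if b.size > (dictOf []).size then b else dictOf []) = b := by
  by_cases h : b.size = 0
  · rw [eq_empty_of_size_zero h]
    simp
  · rw [if_pos (by simp [size_dictOf]; omega)]

theorem foldsel_append (bodies : List (PySem.Dict (Int × Int) Bool))
    (b : PySem.Dict (Int × Int) Bool) :
    foldsel (bodies ++ [b])
      = (if b.size > (foldsel bodies).size then b else foldsel bodies) := by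
  simp [foldsel]

-- A's pair fold with init (b0, |b0|) over all bodies is the running max-by-size fold
theorem sel_pair :
    ∀ (bodies : List (PySem.Dict (Int × Int) Bool)) (b0 : PySem.Dict (Int × Int) Bool),
    (bodies.foldl
      (fun (s : PySem.Dict (Int × Int) Bool × Nat) body =>
        if body.size > s.2 then (body, body.size) else s) (b0, b0.size)).1
    = bodies.foldl (fun s body => if body.size > s.size then body else s) b0 := by
  intro bodies
  induction bodies with
  | nil => intro b0; rfl
  | cons b bs ih =>
    intro b0
    simp only [List.foldl_cons]
    by_cases h : b.size > b0.size
    · rw [if_pos h, if_pos h]; exact ih b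
    · rw [if_neg h, if_neg h]; exact ih b0

-- the outer step functions, definitionally the fold bodies of the two ports
def stepA (pixels : List (Int × Int × Bool))
    (s : PySem.Dict (Int × Int) Bool × List (PySem.Dict (Int × Int) Bool))
    (t : Int × Int × Bool) :
    PySem.Dict (Int × Int) Bool × List (PySem.Dict (Int × Int) Bool) :=
  let pixel := (t.1, t.2.1)
  if s.1.getD pixel false then s
  else
    let body := get_matching_neighbors_from_set pixel pixels true
    let closed' := body.keys.foldl (fun c bp => c.insert bp true) s.1
    (closed', s.2 ++ [body])

def stepB (pixels : List (Int × Int × Bool))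
    (s : PySem.Set (Int × Int) × List (Int × Int)) (t : Int × Int × Bool) :
    PySem.Set (Int × Int) × List (Int × Int) :=
  let seed := (t.1, t.2.1)
  if PySem.Set.contains s.1 seed || !(pixGet pixels seed) then s
  else
    let comp := (layers_from pixels (pixels.length + 1) [seed]
      (PySem.Set.add PySem.Set.empty seed)).flatten
    (PySem.Set.update s.1 comp, if comp.length > s.2.length then comp else s.2)

def selA (bodies : List (PySem.Dict (Int × Int) Bool)) : List (Int × Int × Bool) :=
  match bodies with
  | [] => []
  | b0 :: _ =>
    let sel := bodies.foldl
      (fun (s : PySem.Dict (Int × Int) Bool × Nat) body =>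
        if body.size > s.2 then (body, body.size) else s)
      (b0, b0.size)
    sel.1.items.map (fun p => (p.1.1, p.1.2, p.2))

theorem getA_eq (pixels : List (Int × Int × Bool)) :
    get_largest_body pixels = selA ((pixels.foldl (stepA pixels) (dictOf [], [])).2) := rfl

theorem getB_eq (pixels : List (Int × Int × Bool)) :
    get_largest_body_alt pixels
      = ((pixels.foldl (stepB pixels) (([] : List (Int × Int)), [])).2).map
          (fun p => (p.1, p.2, true)) := rfl

-- the outer loops, in lock step
theorem outer_eq (pixels : List (Int × Int × Bool)) :
    ∀ (ts : List (Int × Int × Bool)) (D best : List (Int × Int))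
      (bodies : List (PySem.Dict (Int × Int) Bool)),
      foldsel bodies = dictOf best →
      (ts.foldl (stepA pixels) (dictOf D, bodies)).1
          = dictOf ((ts.foldl (stepB pixels) (D, best)).1)
      ∧ foldsel ((ts.foldl (stepA pixels) (dictOf D, bodies)).2)
          = dictOf ((ts.foldl (stepB pixels) (D, best)).2) := by
  intro ts
  induction ts with
  | nil => intro D best bodies hrel; exact ⟨rfl, hrel⟩
  | cons t ts ih =>
    intro D best bodies hrel
    simp only [List.foldl_cons, stepA, stepB]
    rw [getD_dictOf, PySem.Set.contains_eq_listContains]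
    by_cases hD : D.contains (t.1, t.2.1) = true
    · rw [if_pos hD, if_pos (by rw [hD]; rfl)]
      exact ih D best bodies hrel
    · have hD' : (t.1, t.2.1) ∉ D := by simpa using hD
      rw [if_neg (by simp [hD'])]
      by_cases hp : pixGet pixels (t.1, t.2.1) = true
      · rw [if_neg (by simp [hD', hp])]
        have hsetseed : PySem.Set.add PySem.Set.empty ((t.1, t.2.1) : Int × Int)
            = [(t.1, t.2.1)] := rfl
        have hbody := gmn_truthy pixels (t.1, t.2.1) hp
        rw [hbody, keys_dictOf, foldl_mark, hsetseed]
        set comp := (layers_from pixels (pixels.length + 1) [(t.1, t.2.1)]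
          [(t.1, t.2.1)]).flatten with hcomp
        have hrel' : foldsel (bodies ++ [dictOf comp])
            = dictOf (if comp.length > best.length then comp else best) := by
          rw [foldsel_append, hrel, size_dictOf, size_dictOf]
          by_cases hl : comp.length > best.length
          · rw [if_pos hl, if_pos hl]
          · rw [if_neg hl, if_neg hl]
        exact ih (PySem.Set.update D comp) _ (bodies ++ [dictOf comp]) hrel'
      · rw [if_pos (by simp [hp])]
        have hb : get_matching_neighbors_from_set (t.1, t.2.1) pixels true = dictOf [] :=
          gmn_falsy pixels _ (by simpa using hp)
        rw [hb, keys_dictOf]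
        simp only [List.foldl_nil]
        have hrel' : foldsel (bodies ++ [dictOf []]) = dictOf best := by
          rw [foldsel_append, hrel, if_neg (by simp [size_dictOf])]
        exact ih D best (bodies ++ [dictOf []]) hrel'

theorem foldl_sel_init (rest : List (PySem.Dict (Int × Int) Bool))
    (b0 : PySem.Dict (Int × Int) Bool) :
    (b0 :: rest).foldl (fun s body => if body.size > s.size then body else s) b0
      = foldsel (b0 :: rest) := by
  simp only [foldsel, List.foldl_cons, selstep_self, selstep_empty]

theorem dictOf_inj {S T : List (Int × Int)} (h : dictOf S = dictOf T) : S = T := by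
  have := congrArg PySem.Dict.keys h
  rwa [keys_dictOf, keys_dictOf] at this

theorem get_largest_body_eq_alt (pixels : List (Int × Int × Bool)) :
    get_largest_body pixels = get_largest_body_alt pixels := by
  rw [getA_eq, getB_eq]
  obtain ⟨h1, h2⟩ := outer_eq pixels pixels [] [] [] rfl
  cases hb : (pixels.foldl (stepA pixels) (dictOf [], [])).2 with
  | nil =>
    rw [hb] at h2
    have hbest : ([] : List (Int × Int))
        = (pixels.foldl (stepB pixels) (([] : List (Int × Int)), [])).2 :=
      dictOf_inj h2
    rw [← hbest]
    rfl
  | cons b0 rest =>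
    rw [hb] at h2
    show selA (b0 :: rest) = _
    unfold selA
    dsimp only
    rw [sel_pair, foldl_sel_init, h2]
    simp [dictOf]

-- ===== VERDICT (by name: the statement is the Claim_ definition above) =====
theorem get_largest_body_spec : Claim_equal_get_largest_body := by
  intro pixels _
  exact get_largest_body_eq_alt pixels
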